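-- pv_equiv track=rewrite | github.com/apaku/aoc2020 | puzzle14/main.py | apply_mask_part2
-- ===== SOURCE A (Python) =====
-- def apply_mask_part2(value, mask_as_str):
--     bin_str = f'{value:036b}'
--     target = [[]]
--     for (i,c) in enumerate(mask_as_str):
--         if c == '0':
--             for t in target:
--                 t.append(bin_str[i])
--         elif c == '1':
--             for t in target:
--                 t.append("1")
--         elif c == 'X':
--             newtargets = []
--             for t in target:
--                 newtargets.append(t + ["0"])
--                 t.append("1")
--             target += newtargets
--     for t in target:
--         yield int("".join(t), 2)
-- ===== SOURCE B (Python) =====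
-- def apply_mask_part2(value, mask_as_str):
--     bin_str = f'{value:036b}'
--     template = []
--     xs = []
--     for i, c in enumerate(mask_as_str):
--         if c == '0':
--             template.append(bin_str[i])
--         elif c == '1':
--             template.append('1')
--         elif c == 'X':
--             xs.append(len(template))
--             template.append(None)
--     for n in range(2 ** len(xs)):
--         t = template[:]
--         for j, pos in enumerate(xs):
--             t[pos] = '0' if (n >> j) & 1 else '1'
--         yield int(''.join(t), 2)
-- ===== Notes on version B (the rewrite author's own statement) =====
-- stated objective: alternative
-- what changed: A grows a list of partial bit-strings, duplicating every partial string at each X; B builds one template plus the list of X slots in a single pass and then materialises each of the 2^k addresses independently from a counter, reading the X bits off the counter's binary digits.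
import Mathlib
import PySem

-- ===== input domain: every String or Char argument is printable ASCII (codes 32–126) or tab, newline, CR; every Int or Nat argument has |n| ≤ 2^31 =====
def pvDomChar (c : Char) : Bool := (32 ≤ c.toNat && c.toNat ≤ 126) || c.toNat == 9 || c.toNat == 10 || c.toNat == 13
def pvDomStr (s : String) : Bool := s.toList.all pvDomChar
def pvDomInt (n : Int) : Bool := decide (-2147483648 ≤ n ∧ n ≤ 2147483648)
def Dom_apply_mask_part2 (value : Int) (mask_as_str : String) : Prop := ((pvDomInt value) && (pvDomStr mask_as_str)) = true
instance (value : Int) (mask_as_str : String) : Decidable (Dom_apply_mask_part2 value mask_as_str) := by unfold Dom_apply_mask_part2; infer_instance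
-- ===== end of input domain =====

-- B replaces A's list of ever-duplicated partial bit-strings by one template plus the X slots,
-- reading each address's X bits off a counter (alternative decomposition, same asymptotic cost).
-- Both Pythons are generators; the Lean ports return the list of yielded values.

-- ===== PORT A =====

-- f'{value:036b}': binary digits (PySem.Int.toBinChars = format(n,'b')) zero-padded to
-- total width 36, the '-' sign (for negatives) counting towards the width. Exact for every Int.
def pvFormat036b (value : Int) : List Char :=
  if value < 0 then '-' :: (List.replicate (35 - (PySem.Int.toBinChars (-value)).length) '0' ++ PySem.Int.toBinChars (-value))
  else List.replicate (36 - (PySem.Int.toBinChars value).length) '0' ++ PySem.Int.toBinChars value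

-- int("".join(t), 2); the ValueError case (ofCharsBase? = none) is excluded by Pre_.
def pvInt2 (t : List Char) : Int := (PySem.Int.ofCharsBase? t 2).getD 0

def apply_mask_part2 (value : Int) (mask_as_str : String) : List Int :=
  let bin_str := pvFormat036b value
  -- for (i,c) in enumerate(mask_as_str): mutate the list `target` of partial char lists
  let target := (PySem.List.enumerate mask_as_str.toList 0).foldl
    (fun (target : List (List Char)) ic =>
      if ic.2 = '0' then target.map (fun t => t ++ [PySem.List.pyGetD bin_str ic.1 '0'])  -- bin_str[i]; IndexError excluded by Pre_
      else if ic.2 = '1' then target.map (fun t => t ++ ['1'])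
      else if ic.2 = 'X' then target.map (fun t => t ++ ['1']) ++ target.map (fun t => t ++ ['0'])
      else target) [[]]
  target.map (fun t => pvInt2 t)

-- ===== PORT B =====

-- t[pos] = '0' if (n >> j) & 1 else '1' for (j,pos) in enumerate(xs), on t = template[:]
def pvFill (tpl : List (Option Char)) (xs : List Nat) (n : Nat) : List (Option Char) :=
  xs.zipIdx.foldl (fun t p => t.set p.1 (if (n >>> p.2) &&& 1 = 1 then some '0' else some '1')) tpl

def apply_mask_part2_alt (value : Int) (mask_as_str : String) : List Int :=
  let bin_str := pvFormat036b value
  -- one pass: template (none = X slot) and the list xs of X positions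
  let st := (PySem.List.enumerate mask_as_str.toList 0).foldl
    (fun (st : List (Option Char) × List Nat) ic =>
      if ic.2 = '0' then (st.1 ++ [some (PySem.List.pyGetD bin_str ic.1 '0')], st.2)
      else if ic.2 = '1' then (st.1 ++ [some '1'], st.2)
      else if ic.2 = 'X' then (st.1 ++ [none], st.2 ++ [st.1.length])
      else st) ([], [])
  -- for n in range(2 ** len(xs)): python's n is a nonnegative int, modelled by Nat
  (List.range (2 ^ st.2.length)).map
    (fun n => pvInt2 ((pvFill st.1 st.2 n).map (fun o => o.getD '0')))

-- ===== PRECONDITION & SPEC =====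
-- Pre_ = exactly the inputs where Python A returns: at least one mask char is significant
-- ('0'/'1'/'X', else int('',2) raises ValueError), no '0' occurs past index 35 in the mask
-- (bin_str has 36 chars for |value| <= 2^31, so bin_str[i] raises IndexError there), and for a
-- negative value whose mask starts with '0' (every address string then starts with the copied
-- '-' sign) some later significant char must exist (else int('-',2) raises ValueError).
def Pre_apply_mask_part2 (value : Int) (mask_as_str : String) : Prop :=
  (mask_as_str.toList.any (fun c => c == '0' || c == '1' || c == 'X')) = true ∧
  ((mask_as_str.toList.drop 36).all (fun c => c != '0')) = true ∧
  (value < 0 → mask_as_str.toList.head? = some '0' →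
    (mask_as_str.toList.tail.any (fun c => c == '0' || c == '1' || c == 'X')) = true)
instance (value : Int) (mask_as_str : String) : Decidable (Pre_apply_mask_part2 value mask_as_str) := by
  unfold Pre_apply_mask_part2; infer_instance

def pvWitness_apply_mask_part2 : Int × String := (5, "X1X0")

def Spec_apply_mask_part2 (value : Int) (mask_as_str : String) (out : List Int) : Prop := out = apply_mask_part2_alt value mask_as_str
instance (value : Int) (mask_as_str : String) (out : List Int) : Decidable (Spec_apply_mask_part2 value mask_as_str out) := by unfold Spec_apply_mask_part2; infer_instance

-- ===== CLAIM (what is proved, stated in full; the proofs are below) =====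
def Claim_equal_apply_mask_part2 : Prop := ∀ (value : Int) (mask_as_str : String), Dom_apply_mask_part2 value mask_as_str → Pre_apply_mask_part2 value mask_as_str → Spec_apply_mask_part2 value mask_as_str (apply_mask_part2 value mask_as_str)

-- ===== LEMMAS AND PROOFS =====

-- the fold of pvFill leaves an appended suffix untouched when every set position hits the prefix
theorem pv_fold_append (m : Nat) (l : List (Nat × Nat)) :
    ∀ (tpl e : List (Option Char)), (∀ p ∈ l, p.1 < tpl.length) →
    l.foldl (fun t p => t.set p.1 (if (m >>> p.2) &&& 1 = 1 then some '0' else some '1')) (tpl ++ e)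
      = l.foldl (fun t p => t.set p.1 (if (m >>> p.2) &&& 1 = 1 then some '0' else some '1')) tpl ++ e := by
  induction l with
  | nil => intro tpl e _; rfl
  | cons q l ih =>
    intro tpl e h
    have hq : q.1 < tpl.length := h q (by simp)
    simp only [List.foldl_cons, List.set_append_left _ _ hq]
    exact ih _ e (by intro p hp; simpa using h p (by simp [hp]))

theorem pv_fold_length (m : Nat) (l : List (Nat × Nat)) :
    ∀ tpl : List (Option Char),
    (l.foldl (fun t p => t.set p.1 (if (m >>> p.2) &&& 1 = 1 then some '0' else some '1')) tpl).length
      = tpl.length := by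
  induction l with
  | nil => intro tpl; rfl
  | cons q l ih => intro tpl; simp only [List.foldl_cons]; rw [ih, List.length_set]

theorem pv_zipIdx_fst_lt {xs : List Nat} {L : Nat} (h : ∀ p ∈ xs, p < L) :
    ∀ p ∈ xs.zipIdx, p.1 < L := by
  rintro ⟨x, i⟩ hp
  obtain ⟨hi, hx⟩ := List.mem_zipIdx' hp
  rw [hx]
  exact h _ (List.getElem_mem _)

theorem pv_fill_append (tpl : List (Option Char)) (xs : List Nat) (n : Nat)
    (e : Option Char) (h : ∀ p ∈ xs, p < tpl.length) :
    pvFill (tpl ++ [e]) xs n = pvFill tpl xs n ++ [e] := by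
  unfold pvFill
  exact pv_fold_append n xs.zipIdx tpl [e] (pv_zipIdx_fst_lt h)

-- pvFill only looks at the bits of n at the enumerate indices of xs
theorem pv_fill_congr (xs : List Nat) :
    ∀ (k : Nat) (tpl : List (Option Char)) (m m' : Nat),
    (∀ j, k ≤ j → j < k + xs.length → (m >>> j) &&& 1 = (m' >>> j) &&& 1) →
    (xs.zipIdx k).foldl (fun t p => t.set p.1 (if (m >>> p.2) &&& 1 = 1 then some '0' else some '1')) tpl
      = (xs.zipIdx k).foldl (fun t p => t.set p.1 (if (m' >>> p.2) &&& 1 = 1 then some '0' else some '1')) tpl := by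
  induction xs with
  | nil => intro k tpl m m' _; rfl
  | cons x xs ih =>
    intro k tpl m m' h
    simp only [List.zipIdx_cons, List.foldl_cons]
    rw [h k le_rfl (by simp), ih (k + 1) _ m m' (fun j h1 h2 => h j (by omega) (by simp at h2 ⊢; omega))]

-- bit j of 2^k + n equals bit j of n, for j < k
theorem pv_bit_low (k j n : Nat) (hj : j < k) :
    ((2 ^ k + n) >>> j) &&& 1 = (n >>> j) &&& 1 := by
  simp only [Nat.shiftRight_eq_div_pow, Nat.and_one_is_mod]
  have hk : 2 * 2 ^ (k - j - 1) * 2 ^ j = 2 ^ k := by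
    have h2 : k - j - 1 + 1 + j = k := by omega
    calc 2 * 2 ^ (k - j - 1) * 2 ^ j = 2 ^ (k - j - 1 + 1 + j) := by ring
      _ = 2 ^ k := by rw [h2]
  rw [← hk, Nat.add_comm, Nat.add_mul_div_right _ _ (Nat.two_pow_pos j), Nat.add_mul_mod_self_left]

theorem pv_bit_top_lo (k n : Nat) (hn : n < 2 ^ k) : (n >>> k) &&& 1 = 0 := by
  simp [Nat.shiftRight_eq_div_pow, Nat.and_one_is_mod, Nat.div_eq_of_lt hn]

theorem pv_bit_top_hi (k n : Nat) (hn : n < 2 ^ k) : ((2 ^ k + n) >>> k) &&& 1 = 1 := by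
  simp only [Nat.shiftRight_eq_div_pow, Nat.and_one_is_mod]
  rw [Nat.add_comm, Nat.add_div_right _ (Nat.two_pow_pos k), Nat.div_eq_of_lt hn]

-- the X step: one more slot at the end of the template, driven by bit (len xs) of m
theorem pv_fill_snoc (tpl : List (Option Char)) (xs : List Nat) (m : Nat)
    (h : ∀ p ∈ xs, p < tpl.length) :
    pvFill (tpl ++ [none]) (xs ++ [tpl.length]) m
      = pvFill tpl xs m ++ [if (m >>> xs.length) &&& 1 = 1 then some '0' else some '1'] := by
  unfold pvFill
  rw [List.zipIdx_append, List.foldl_append,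
    pv_fold_append m xs.zipIdx tpl [none] (pv_zipIdx_fst_lt h)]
  simp only [List.zipIdx_cons, List.zipIdx_nil, List.foldl_cons, List.foldl_nil, Nat.zero_add]
  rw [List.set_append_right _ _ (le_of_eq (pv_fold_length m xs.zipIdx tpl))]
  rw [pv_fold_length m xs.zipIdx tpl]
  simp

-- main invariant: A's list of partial strings is exactly B's rendering of (template, xs)
theorem pv_main (bin : List Char) (l : List (Int × Char)) :
    ∀ (tpl : List (Option Char)) (xs : List Nat), (∀ p ∈ xs, p < tpl.length) →
    l.foldl
      (fun (target : List (List Char)) ic =>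
        if ic.2 = '0' then target.map (fun t => t ++ [PySem.List.pyGetD bin ic.1 '0'])
        else if ic.2 = '1' then target.map (fun t => t ++ ['1'])
        else if ic.2 = 'X' then target.map (fun t => t ++ ['1']) ++ target.map (fun t => t ++ ['0'])
        else target)
      ((List.range (2 ^ xs.length)).map (fun n => (pvFill tpl xs n).map (fun o => o.getD '0')))
    = (fun st : List (Option Char) × List Nat =>
        (List.range (2 ^ st.2.length)).map (fun n => (pvFill st.1 st.2 n).map (fun o => o.getD '0')))
      (l.foldl
        (fun (st : List (Option Char) × List Nat) ic =>
          if ic.2 = '0' then (st.1 ++ [some (PySem.List.pyGetD bin ic.1 '0')], st.2)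
          else if ic.2 = '1' then (st.1 ++ [some '1'], st.2)
          else if ic.2 = 'X' then (st.1 ++ [none], st.2 ++ [st.1.length])
          else st) (tpl, xs)) := by
  induction l with
  | nil => intro tpl xs _; rfl
  | cons ic l ih =>
    intro tpl xs h
    simp only [List.foldl_cons]
    by_cases h0 : ic.2 = '0'
    · -- append the copied bin_str character to every partial string / to the template
      have hA : (if ic.2 = '0' then
            ((List.range (2 ^ xs.length)).map (fun n => (pvFill tpl xs n).map (fun o => o.getD '0'))).map
              (fun t => t ++ [PySem.List.pyGetD bin ic.1 '0'])
          else if ic.2 = '1' then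
            ((List.range (2 ^ xs.length)).map (fun n => (pvFill tpl xs n).map (fun o => o.getD '0'))).map
              (fun t => t ++ ['1'])
          else if ic.2 = 'X' then
            ((List.range (2 ^ xs.length)).map (fun n => (pvFill tpl xs n).map (fun o => o.getD '0'))).map
              (fun t => t ++ ['1'])
            ++ ((List.range (2 ^ xs.length)).map (fun n => (pvFill tpl xs n).map (fun o => o.getD '0'))).map
              (fun t => t ++ ['0'])
          else (List.range (2 ^ xs.length)).map (fun n => (pvFill tpl xs n).map (fun o => o.getD '0')))
          = (List.range (2 ^ (xs : List Nat).length)).map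
              (fun n => (pvFill (tpl ++ [some (PySem.List.pyGetD bin ic.1 '0')]) xs n).map (fun o => o.getD '0')) := by
        rw [if_pos h0, List.map_map]
        apply List.map_congr_left
        intro n _
        simp [Function.comp, pv_fill_append tpl xs n _ h]
      rw [hA, if_pos h0]
      exact ih (tpl ++ [some (PySem.List.pyGetD bin ic.1 '0')]) xs
        (by intro p hp; have := h p hp; simp only [List.length_append, List.length_cons]; omega)
    · by_cases h1 : ic.2 = '1'
      · have hA : (if ic.2 = '0' then
              ((List.range (2 ^ xs.length)).map (fun n => (pvFill tpl xs n).map (fun o => o.getD '0'))).map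
                (fun t => t ++ [PySem.List.pyGetD bin ic.1 '0'])
            else if ic.2 = '1' then
              ((List.range (2 ^ xs.length)).map (fun n => (pvFill tpl xs n).map (fun o => o.getD '0'))).map
                (fun t => t ++ ['1'])
            else if ic.2 = 'X' then
              ((List.range (2 ^ xs.length)).map (fun n => (pvFill tpl xs n).map (fun o => o.getD '0'))).map
                (fun t => t ++ ['1'])
              ++ ((List.range (2 ^ xs.length)).map (fun n => (pvFill tpl xs n).map (fun o => o.getD '0'))).map
                (fun t => t ++ ['0'])
            else (List.range (2 ^ xs.length)).map (fun n => (pvFill tpl xs n).map (fun o => o.getD '0')))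
            = (List.range (2 ^ (xs : List Nat).length)).map
                (fun n => (pvFill (tpl ++ [some '1']) xs n).map (fun o => o.getD '0')) := by
          rw [if_neg h0, if_pos h1, List.map_map]
          apply List.map_congr_left
          intro n _
          simp [Function.comp, pv_fill_append tpl xs n _ h]
        rw [hA, if_neg h0, if_pos h1]
        exact ih (tpl ++ [some '1']) xs
          (by intro p hp; have := h p hp; simp only [List.length_append, List.length_cons]; omega)
      · by_cases hX : ic.2 = 'X'
        · have hA : (if ic.2 = '0' then
                ((List.range (2 ^ xs.length)).map (fun n => (pvFill tpl xs n).map (fun o => o.getD '0'))).map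
                  (fun t => t ++ [PySem.List.pyGetD bin ic.1 '0'])
              else if ic.2 = '1' then
                ((List.range (2 ^ xs.length)).map (fun n => (pvFill tpl xs n).map (fun o => o.getD '0'))).map
                  (fun t => t ++ ['1'])
              else if ic.2 = 'X' then
                ((List.range (2 ^ xs.length)).map (fun n => (pvFill tpl xs n).map (fun o => o.getD '0'))).map
                  (fun t => t ++ ['1'])
                ++ ((List.range (2 ^ xs.length)).map (fun n => (pvFill tpl xs n).map (fun o => o.getD '0'))).map
                  (fun t => t ++ ['0'])
              else (List.range (2 ^ xs.length)).map (fun n => (pvFill tpl xs n).map (fun o => o.getD '0')))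
              = (List.range (2 ^ (xs ++ [tpl.length]).length)).map
                  (fun n => (pvFill (tpl ++ [none]) (xs ++ [tpl.length]) n).map (fun o => o.getD '0')) := by
            rw [if_neg h0, if_neg h1, if_pos hX, List.map_map, List.map_map]
            have hlen : (xs ++ [tpl.length]).length = xs.length + 1 := by simp
            rw [hlen, pow_succ, mul_two, List.range_add, List.map_append, List.map_map]
            congr 1
            · apply List.map_congr_left
              intro n hn
              have hn' : n < 2 ^ xs.length := List.mem_range.mp hn
              simp only [Function.comp]
              rw [pv_fill_snoc tpl xs n h, pv_bit_top_lo xs.length n hn']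
              simp
            · apply List.map_congr_left
              intro n hn
              have hn' : n < 2 ^ xs.length := List.mem_range.mp hn
              simp only [Function.comp]
              rw [pv_fill_snoc tpl xs _ h, pv_bit_top_hi xs.length n hn']
              have hfill : pvFill tpl xs (2 ^ xs.length + n) = pvFill tpl xs n := by
                unfold pvFill
                exact pv_fill_congr xs 0 tpl _ n
                  (fun j _ h2 => pv_bit_low xs.length j n (by simpa using h2))
              simp [hfill]
          rw [hA, if_neg h0, if_neg h1, if_pos hX]
          exact ih (tpl ++ [none]) (xs ++ [tpl.length])
            (by intro p hp
                simp only [List.mem_append, List.mem_singleton] at hp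
                simp only [List.length_append, List.length_cons, List.length_nil]
                rcases hp with hp | hp
                · have := h p hp; omega
                · omega)
        · rw [if_neg h0, if_neg h1, if_neg hX, if_neg h0, if_neg h1, if_neg hX]
          exact ih tpl xs h

-- ===== VERDICT (by name: the statement is the Claim_ definition above) =====
theorem apply_mask_part2_spec : Claim_equal_apply_mask_part2 := by
  unfold Claim_equal_apply_mask_part2
  intro value mask_as_str _ _
  unfold Spec_apply_mask_part2
  simp only [apply_mask_part2, apply_mask_part2_alt]
  have h0 : ([[]] : List (List Char))
      = (List.range (2 ^ ([] : List Nat).length)).map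
          (fun n => (pvFill ([] : List (Option Char)) [] n).map (fun o => o.getD '0')) := by rfl
  rw [h0, pv_main (pvFormat036b value) (PySem.List.enumerate mask_as_str.toList 0) [] []
    (by intro p hp; simp at hp)]
  rw [List.map_map]
  rfl
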